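-- pv_equiv track=rewrite | github.com/WenqiJiang/VGG16_FPGA_Accelerator | fixed_point/fixed_arith.py | fixed_add_array
-- ===== SOURCE A (Python) =====
-- def unsigned_fixed_add(x1, x2):
--     """ unsigned fixed point add
--     x1, x2: string of signed fixed point number,
--             they must have the same length, e.g. 15.
--     return:
--         a tuple (carry_flag, fixed_result)
--         carry_flag: 0 or 1
--         fixed_result: string which has same bit as inputs
--     """
--     assert len(x1) == len(x2)
--     carry = 0
--     fixed_result = ''
--
--     for i in reversed(range(len(x1))):
--         if x1[i] == '0' and x2[i] == '0':
--             if carry == 1: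
--                 fixed_result += '1'
--             else:
--                 fixed_result += '0'
--             carry = 0
--         elif x1[i] == '1' and x2[i] == '1':
--             if carry == 1:
--                 fixed_result += '1'
--             else:
--                 fixed_result += '0'
--             carry = 1
--         else: # one 1 and one 0
--             if carry == 1:
--                 fixed_result += '0'
--                 carry = 1
--             else:
--                 fixed_result += '1'
--                 carry = 0
--
--     return (carry, fixed_result[::-1])
--
-- def fixed_add_array(adder_array, integer=8):
--     """ given a list of fixed point 16, return the sum
--     x_arr: list of fp16 strings
--     integer: number of digits
--     return:
--         a single fp16
--     """
--     if len(adder_array) == 0: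
--         return '0' * 16
--     elif len(adder_array) == 1:
--         return adder_array[0]
--     else:
--         last_ele = adder_array[0]
--
--         for i in range(1, len(adder_array)):
--             this_carry, temp_result = unsigned_fixed_add(adder_array[i], last_ele)
-- #             if this_carry:
-- #                 raise Exception("overflow detected in function 'fixed_add_array'")
--             last_ele = temp_result
--
--         return last_ele
-- ===== SOURCE B (Python) =====
-- def fixed_add_array(adder_array, integer=8):
--     """ given a list of fixed point 16, return the sum (integer sum mod 2^L) """
--     if len(adder_array) == 0:
--         return '0' * 16
--     if len(adder_array) == 1:
--         return adder_array[0]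
--     L = len(adder_array[0])
--     total = sum(int(s, 2) for s in adder_array)
--     return format(total & ((1 << L) - 1), '0{}b'.format(L))
-- ===== Notes on version B (the rewrite author's own statement) =====
-- stated objective: simpler
-- what changed: Replaces the per-element 16-step ripple-carry string adder with one integer sum of all parsed elements followed by a single mask-and-format modulo 2^L.
-- outside the precondition, e.g. on fixed_add_array(['a', 'b'], 8): A returns '1', B raises ValueError; on fixed_add_array(['', ''], 8): A returns '', B raises ValueError
import Mathlib
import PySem

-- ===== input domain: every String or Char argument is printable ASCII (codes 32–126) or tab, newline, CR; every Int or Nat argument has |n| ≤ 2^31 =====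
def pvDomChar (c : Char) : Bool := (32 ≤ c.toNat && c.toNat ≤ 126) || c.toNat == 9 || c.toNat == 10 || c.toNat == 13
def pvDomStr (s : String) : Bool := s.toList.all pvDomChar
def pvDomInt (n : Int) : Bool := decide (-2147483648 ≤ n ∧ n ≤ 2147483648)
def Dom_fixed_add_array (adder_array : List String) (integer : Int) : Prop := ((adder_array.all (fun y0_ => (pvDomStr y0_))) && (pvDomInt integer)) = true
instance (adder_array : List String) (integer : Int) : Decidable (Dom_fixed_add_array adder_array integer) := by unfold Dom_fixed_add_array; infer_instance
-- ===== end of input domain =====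

-- B replaces A's per-element 16-step ripple-carry string adder by one integer sum of the parsed
-- elements followed by a single mask-and-format modulo 2^L (objective: simpler).

-- ===== PORT A =====
-- one iteration of the ripple-carry loop of unsigned_fixed_add (the list.getD indexing is exact:
-- i is always in range for x1, and for x2 whenever the lengths are equal, which Pre_ guarantees —
-- on unequal lengths Python raises AssertionError, excluded by Pre_)
def pvUFAStep (x1 x2 : List Char) (st : Int × List Char) (i : Nat) : Int × List Char :=
  if x1.getD i ' ' = '0' ∧ x2.getD i ' ' = '0' then
    ((0 : Int), st.2 ++ [if st.1 = 1 then '1' else '0'])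
  else if x1.getD i ' ' = '1' ∧ x2.getD i ' ' = '1' then
    ((1 : Int), st.2 ++ [if st.1 = 1 then '1' else '0'])
  else -- one 1 and one 0 (Python's else also swallows any non-binary character; Pre_ excludes those)
    if st.1 = 1 then ((1 : Int), st.2 ++ ['0']) else ((0 : Int), st.2 ++ ['1'])

def unsigned_fixed_add (x1 x2 : List Char) : Int × List Char :=
  let r := ((List.range x1.length).reverse).foldl (pvUFAStep x1 x2) ((0 : Int), ([] : List Char))
  (r.1, r.2.reverse)

def fixed_add_array (adder_array : List String) (integer : Int) : String :=
  if PySem.List.len adder_array = 0 then String.ofList (List.replicate 16 '0')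
  else if PySem.List.len adder_array = 1 then PySem.List.pyGetD adder_array 0 ""
  else
    (PySem.List.pyRange 1 (PySem.List.len adder_array)).foldl
      (fun last_ele i =>
        String.ofList (unsigned_fixed_add (PySem.List.pyGetD adder_array i "").toList last_ele.toList).2)
      (PySem.List.pyGetD adder_array 0 "")

-- ===== PORT B =====
-- int(s, 2): exact on the nonempty all-'0'/'1' strings Pre_ admits (the general parser cases of
-- int(s, 2) — sign, whitespace, underscores, 0b-prefix — are excluded by Pre_)
def pvInt2 (s : String) : Int :=
  s.toList.foldl (fun a c => 2 * a + (if c = '1' then 1 else 0)) 0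

-- binary digits of m, most significant first, no leading zeros (empty for 0)
def pvBinNat : Nat → List Char
  | 0 => []
  | (n+1) => pvBinNat ((n+1)/2) ++ [if (n+1) % 2 = 1 then '1' else '0']

-- format(m, '0{L}b'): exact for 0 ≤ m and 1 ≤ L (the case Pre_ admits)
def pvFormatB (m : Int) (L : Nat) : String :=
  String.ofList (List.replicate (L - (pvBinNat m.toNat).length) '0' ++ pvBinNat m.toNat)

def fixed_add_array_alt (adder_array : List String) (integer : Int) : String :=
  if PySem.List.len adder_array = 0 then String.ofList (List.replicate 16 '0')
  else if PySem.List.len adder_array = 1 then PySem.List.pyGetD adder_array 0 ""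
  else
    let L := (PySem.List.pyGetD adder_array 0 "").toList.length
    let total := (adder_array.map pvInt2).sum
    pvFormatB (PySem.Int.band total ((1 <<< L) - 1)) L

-- ===== PRECONDITION & SPEC =====
-- For two-or-more elements Pre_ admits exactly arrays of equal-length nonempty binary strings:
-- on unequal lengths A raises AssertionError; on non-'0'/'1' characters A's else-branch silently
-- adds the pair as if it were a 1 and a 0 while B's int(s,2) raises ValueError; on empty-string
-- elements A returns '' where B's int('',2) raises ValueError.
def Pre_fixed_add_array (adder_array : List String) (integer : Int) : Prop :=
  adder_array.length ≤ 1 ∨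
    (1 ≤ (adder_array.headD "").toList.length ∧
     adder_array.all (fun s => s.toList.length == (adder_array.headD "").toList.length
       && s.toList.all (fun c => c == '0' || c == '1')) = true)
instance (adder_array : List String) (integer : Int) : Decidable (Pre_fixed_add_array adder_array integer) := by
  unfold Pre_fixed_add_array; infer_instance

def pvWitness_fixed_add_array : List String × Int := (["0101", "1110", "1000"], 8)

def Spec_fixed_add_array (adder_array : List String) (integer : Int) (out : String) : Prop := out = fixed_add_array_alt adder_array integer
instance (adder_array : List String) (integer : Int) (out : String) : Decidable (Spec_fixed_add_array adder_array integer out) := by unfold Spec_fixed_add_array; infer_instance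

-- ===== CLAIM (what is proved, stated in full; the proofs are below) =====
def Claim_equal_fixed_add_array : Prop := ∀ (adder_array : List String) (integer : Int), Dom_fixed_add_array adder_array integer → Pre_fixed_add_array adder_array integer → Spec_fixed_add_array adder_array integer (fixed_add_array adder_array integer)

-- ===== LEMMAS AND PROOFS =====

-- numeric value of a binary digit string, most significant digit first
def pvVal (cs : List Char) : Nat := cs.foldl (fun a c => 2 * a + (if c = '1' then 1 else 0)) 0

-- all characters are binary digits
def pvIsB (cs : List Char) : Prop := ∀ c ∈ cs, c = '0' ∨ c = '1'

-- the n low-order bits of m, least significant first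
def pvBitsLSB : Nat → Nat → List Char
  | 0, _ => []
  | (n+1), m => (if m % 2 = 1 then '1' else '0') :: pvBitsLSB n (m / 2)

lemma pvVal_append_singleton (l : List Char) (a : Char) :
    pvVal (l ++ [a]) = 2 * pvVal l + (if a = '1' then 1 else 0) := by
  simp [pvVal, List.foldl_append]

lemma pvBitsLSB_length (n m : Nat) : (pvBitsLSB n m).length = n := by
  induction n generalizing m with
  | zero => rfl
  | succ n ih => simp [pvBitsLSB, ih]

lemma pvBitsLSB_isB (n m : Nat) : pvIsB (pvBitsLSB n m) := by
  induction n generalizing m with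
  | zero => intro c hc; simp [pvBitsLSB] at hc
  | succ n ih =>
    intro c hc
    simp only [pvBitsLSB, List.mem_cons] at hc
    rcases hc with rfl | hc
    · split_ifs <;> simp
    · exact ih _ c hc

lemma pvVal_reverse_bitsLSB (n m : Nat) : pvVal ((pvBitsLSB n m).reverse) = m % 2 ^ n := by
  induction n generalizing m with
  | zero => simp [pvBitsLSB, pvVal, Nat.mod_one]
  | succ n ih =>
    have h1 : m / 2 % 2 ^ n = m % (2 * 2 ^ n) / 2 := (Nat.mod_mul_right_div_self m 2 (2 ^ n)).symm
    have h2 : m % 2 = m % (2 * 2 ^ n) % 2 := (Nat.mod_mod_of_dvd m ⟨2 ^ n, rfl⟩).symm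
    have hpow : 2 ^ (n + 1) = 2 * 2 ^ n := by ring
    simp only [pvBitsLSB, List.reverse_cons, pvVal_append_singleton, ih]
    have hb : (if (if m % 2 = 1 then '1' else '0') = '1' then 1 else 0) = m % 2 := by
      split_ifs <;> simp_all
    rw [hb, hpow, h1, h2]
    set M := m % (2 * 2 ^ n) with hM
    omega

lemma pvBitsLSB_mod (n m : Nat) : pvBitsLSB n (m % 2 ^ n) = pvBitsLSB n m := by
  induction n generalizing m with
  | zero => rfl
  | succ n ih =>
    have hpow : 2 ^ (n + 1) = 2 * 2 ^ n := by ring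
    have h1 : m % 2 ^ (n+1) % 2 = m % 2 := by rw [hpow]; exact Nat.mod_mod_of_dvd m ⟨2 ^ n, rfl⟩
    have h2 : m % 2 ^ (n+1) / 2 = m / 2 % 2 ^ n := by rw [hpow]; exact Nat.mod_mul_right_div_self m 2 (2 ^ n)
    simp only [pvBitsLSB, h1, h2, ih]

lemma pvBits_pad : ∀ (L m : Nat), m < 2 ^ L →
    (pvBitsLSB L m).reverse = List.replicate (L - (pvBinNat m).length) '0' ++ pvBinNat m := by
  intro L
  induction L with
  | zero =>
    intro m hm
    interval_cases m
    simp [pvBitsLSB, pvBinNat]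
  | succ L ih =>
    intro m hm
    have hdiv : m / 2 < 2 ^ L := by
      rw [Nat.div_lt_iff_lt_mul (by norm_num)]
      calc m < 2 ^ (L + 1) := hm
        _ = 2 ^ L * 2 := by ring
    simp only [pvBitsLSB, List.reverse_cons, ih _ hdiv]
    match m with
    | 0 => simp [pvBinNat, List.replicate_succ']
    | (k+1) =>
      have hb : pvBinNat (k+1) = pvBinNat ((k+1)/2) ++ [if (k+1) % 2 = 1 then '1' else '0'] := by
        simp [pvBinNat]
      rw [hb]
      simp [List.append_assoc, Nat.succ_sub_succ]

lemma pvUFAStep_switch (t1 t2 : List Char) (a b : Char) (n : Nat) (h1 : t1.length = n)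
    (h2 : t2.length = n) (st : Int × List Char) :
    ((List.range n).reverse).foldl (pvUFAStep (t1 ++ [a]) (t2 ++ [b])) st
      = ((List.range n).reverse).foldl (pvUFAStep t1 t2) st := by
  apply PySem.List.foldl_congr_mem
  intro acc i hi
  have hi' : i < n := by simpa using hi
  have g1 : (t1 ++ [a]).getD i ' ' = t1.getD i ' ' := by rw [List.getD_append]; omega
  have g2 : (t2 ++ [b]).getD i ' ' = t2.getD i ' ' := by rw [List.getD_append]; omega
  simp only [pvUFAStep, g1, g2]

lemma pvBits_step (n T bit : Nat) (hb : bit < 2) :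
    pvBitsLSB (n+1) (2*T + bit) = (if bit = 1 then '1' else '0') :: pvBitsLSB n T
      ∧ (2*T + bit) / 2 ^ (n+1) = T / 2 ^ n := by
  constructor
  · have h1 : (2*T + bit) % 2 = bit := by omega
    have h2 : (2*T + bit) / 2 = T := by omega
    simp [pvBitsLSB, h1, h2]
  · have hpow : 2 ^ (n + 1) = 2 * 2 ^ n := by ring
    rw [hpow, ← Nat.div_div_eq_div_mul]
    congr 1
    omega

lemma pvUFA_finish (n : Nat) (t1 t2 acc : List Char) (ht1 : t1.length = n) (ht2 : t2.length = n)
    (bt1 : pvIsB t1) (bt2 : pvIsB t2) (S : Nat) (c' : Int) (bitc : Char) (bitv : Nat)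
    (hc' : c' = 0 ∨ c' = 1) (hbit : bitv < 2) (hbitc : bitc = if bitv = 1 then '1' else '0')
    (hS : S = 2 * (pvVal t1 + pvVal t2 + c'.toNat) + bitv)
    (ih : ∀ (x1 x2 : List Char), x1.length = n → x2.length = n →
      pvIsB x1 → pvIsB x2 → ∀ (c : Int), (c = 0 ∨ c = 1) → ∀ (acc : List Char),
      ((List.range n).reverse).foldl (pvUFAStep x1 x2) (c, acc)
        = ((((pvVal x1 + pvVal x2 + c.toNat) / 2 ^ n : Nat) : Int),
            acc ++ pvBitsLSB n (pvVal x1 + pvVal x2 + c.toNat))) :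
    ((List.range n).reverse).foldl (pvUFAStep t1 t2) (c', acc ++ [bitc])
      = (((S / 2 ^ (n+1) : Nat) : Int), acc ++ pvBitsLSB (n+1) S) := by
  rw [ih t1 t2 ht1 ht2 bt1 bt2 c' hc' (acc ++ [bitc])]
  subst hS hbitc
  obtain ⟨e1, e2⟩ := pvBits_step n (pvVal t1 + pvVal t2 + c'.toNat) bitv hbit
  rw [e1, e2]
  simp [List.append_assoc]

lemma pvUFA_loop : ∀ (n : Nat) (x1 x2 : List Char), x1.length = n → x2.length = n →
    pvIsB x1 → pvIsB x2 → ∀ (c : Int), (c = 0 ∨ c = 1) → ∀ (acc : List Char),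
    ((List.range n).reverse).foldl (pvUFAStep x1 x2) (c, acc)
      = ((((pvVal x1 + pvVal x2 + c.toNat) / 2 ^ n : Nat) : Int),
          acc ++ pvBitsLSB n (pvVal x1 + pvVal x2 + c.toNat)) := by
  intro n
  induction n with
  | zero =>
    intro x1 x2 h1 h2 _ _ c hc acc
    have e1 : x1 = [] := List.eq_nil_of_length_eq_zero h1
    have e2 : x2 = [] := List.eq_nil_of_length_eq_zero h2
    subst e1 e2
    rcases hc with rfl | rfl <;> simp [pvVal, pvBitsLSB]
  | succ n ih =>
    intro x1 x2 h1 h2 b1 b2 c hc acc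
    have hx1 : x1 ≠ [] := by intro h; rw [h] at h1; simp at h1
    have hx2 : x2 ≠ [] := by intro h; rw [h] at h2; simp at h2
    obtain ⟨t1, a, rfl⟩ : ∃ t1 a, x1 = t1 ++ [a] :=
      ⟨x1.dropLast, x1.getLast hx1, (List.dropLast_append_getLast hx1).symm⟩
    obtain ⟨t2, b, rfl⟩ : ∃ t2 b, x2 = t2 ++ [b] :=
      ⟨x2.dropLast, x2.getLast hx2, (List.dropLast_append_getLast hx2).symm⟩
    have ht1 : t1.length = n := by simp at h1; omega
    have ht2 : t2.length = n := by simp at h2; omega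
    have bt1 : pvIsB t1 := fun c hc => b1 c (by simp [hc])
    have bt2 : pvIsB t2 := fun c hc => b2 c (by simp [hc])
    have ha : a = '0' ∨ a = '1' := b1 a (by simp)
    have hb : b = '0' ∨ b = '1' := b2 b (by simp)
    have ga : (t1 ++ [a]).getD n ' ' = a := by
      rw [← ht1]
      simp [List.getD_eq_getElem?_getD]
    have gb : (t2 ++ [b]).getD n ' ' = b := by
      rw [← ht2]
      simp [List.getD_eq_getElem?_getD]
    rw [List.range_succ, List.reverse_append]
    simp only [List.reverse_cons, List.reverse_nil, List.nil_append, List.singleton_append,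
      List.foldl_cons]
    rw [pvUFAStep_switch t1 t2 a b n ht1 ht2]
    rcases ha with rfl | rfl <;> rcases hb with rfl | rfl <;> rcases hc with rfl | rfl
    · have hstep : pvUFAStep (t1 ++ ['0']) (t2 ++ ['0']) ((0 : Int), acc) n = (0, acc ++ ['0']) := by
        unfold pvUFAStep; rw [ga, gb]; simp
      rw [hstep]
      exact pvUFA_finish n t1 t2 acc ht1 ht2 bt1 bt2 _ 0 '0' 0 (Or.inl rfl) (by omega)
        (by norm_num) (by simp [pvVal_append_singleton]; try omega) ih
    · have hstep : pvUFAStep (t1 ++ ['0']) (t2 ++ ['0']) ((1 : Int), acc) n = (0, acc ++ ['1']) := by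
        unfold pvUFAStep; rw [ga, gb]; simp
      rw [hstep]
      exact pvUFA_finish n t1 t2 acc ht1 ht2 bt1 bt2 _ 0 '1' 1 (Or.inl rfl) (by omega)
        (by norm_num) (by simp [pvVal_append_singleton]; try omega) ih
    · have hstep : pvUFAStep (t1 ++ ['0']) (t2 ++ ['1']) ((0 : Int), acc) n = (0, acc ++ ['1']) := by
        unfold pvUFAStep; rw [ga, gb]; simp
      rw [hstep]
      exact pvUFA_finish n t1 t2 acc ht1 ht2 bt1 bt2 _ 0 '1' 1 (Or.inl rfl) (by omega)
        (by norm_num) (by simp [pvVal_append_singleton]; try omega) ih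
    · have hstep : pvUFAStep (t1 ++ ['0']) (t2 ++ ['1']) ((1 : Int), acc) n = (1, acc ++ ['0']) := by
        unfold pvUFAStep; rw [ga, gb]; simp
      rw [hstep]
      exact pvUFA_finish n t1 t2 acc ht1 ht2 bt1 bt2 _ 1 '0' 0 (Or.inr rfl) (by omega)
        (by norm_num) (by simp [pvVal_append_singleton]; try omega) ih
    · have hstep : pvUFAStep (t1 ++ ['1']) (t2 ++ ['0']) ((0 : Int), acc) n = (0, acc ++ ['1']) := by
        unfold pvUFAStep; rw [ga, gb]; simp
      rw [hstep]
      exact pvUFA_finish n t1 t2 acc ht1 ht2 bt1 bt2 _ 0 '1' 1 (Or.inl rfl) (by omega)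
        (by norm_num) (by simp [pvVal_append_singleton]; try omega) ih
    · have hstep : pvUFAStep (t1 ++ ['1']) (t2 ++ ['0']) ((1 : Int), acc) n = (1, acc ++ ['0']) := by
        unfold pvUFAStep; rw [ga, gb]; simp
      rw [hstep]
      exact pvUFA_finish n t1 t2 acc ht1 ht2 bt1 bt2 _ 1 '0' 0 (Or.inr rfl) (by omega)
        (by norm_num) (by simp [pvVal_append_singleton]; try omega) ih
    · have hstep : pvUFAStep (t1 ++ ['1']) (t2 ++ ['1']) ((0 : Int), acc) n = (1, acc ++ ['0']) := by
        unfold pvUFAStep; rw [ga, gb]; simp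
      rw [hstep]
      exact pvUFA_finish n t1 t2 acc ht1 ht2 bt1 bt2 _ 1 '0' 0 (Or.inr rfl) (by omega)
        (by norm_num) (by simp [pvVal_append_singleton]; try omega) ih
    · have hstep : pvUFAStep (t1 ++ ['1']) (t2 ++ ['1']) ((1 : Int), acc) n = (1, acc ++ ['1']) := by
        unfold pvUFAStep; rw [ga, gb]; simp
      rw [hstep]
      exact pvUFA_finish n t1 t2 acc ht1 ht2 bt1 bt2 _ 1 '1' 1 (Or.inr rfl) (by omega)
        (by norm_num) (by simp [pvVal_append_singleton]; try omega) ih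

lemma pvUFA_result (L : Nat) (x1 x2 : List Char) (h1 : x1.length = L) (h2 : x2.length = L)
    (b1 : pvIsB x1) (b2 : pvIsB x2) :
    (unsigned_fixed_add x1 x2).2 = (pvBitsLSB L (pvVal x1 + pvVal x2)).reverse := by
  unfold unsigned_fixed_add
  rw [h1, pvUFA_loop L x1 x2 h1 h2 b1 b2 0 (Or.inl rfl) []]
  simp

lemma pvFold_tail (L : Nat) : ∀ (rest : List String),
    (∀ s ∈ rest, s.toList.length = L ∧ pvIsB s.toList) → ∀ (X : Nat),
    rest.foldl (fun last s => String.ofList (unsigned_fixed_add s.toList last.toList).2)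
        (String.ofList (pvBitsLSB L X).reverse)
      = String.ofList (pvBitsLSB L (X + (rest.map (fun s => pvVal s.toList)).sum)).reverse := by
  intro rest
  induction rest with
  | nil => intro _ X; simp
  | cons s rest ih =>
    intro hmem X
    obtain ⟨hsl, hsb⟩ := hmem s (by simp)
    have hrev_len : ((pvBitsLSB L X).reverse).length = L := by simp [pvBitsLSB_length]
    have hrev_b : pvIsB ((pvBitsLSB L X).reverse) := by
      intro c hc; exact pvBitsLSB_isB L X c (by simpa using hc)
    have hmod : (pvVal s.toList + X % 2 ^ L) % 2 ^ L = (X + pvVal s.toList) % 2 ^ L := by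
      rw [Nat.add_mod (pvVal s.toList) (X % 2 ^ L), Nat.mod_mod_of_dvd _ (dvd_refl _),
        ← Nat.add_mod, Nat.add_comm]
    have hstep : (unsigned_fixed_add s.toList ((pvBitsLSB L X).reverse)).2
        = (pvBitsLSB L (X + pvVal s.toList)).reverse := by
      rw [pvUFA_result L _ _ hsl hrev_len hsb hrev_b, pvVal_reverse_bitsLSB,
        ← pvBitsLSB_mod L (pvVal s.toList + X % 2 ^ L), hmod, pvBitsLSB_mod]
    simp only [List.foldl_cons, String.toList_ofList, hstep]
    rw [ih (fun t ht => hmem t (by simp [ht])) (X + pvVal s.toList)]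
    have harr : X + pvVal s.toList + (rest.map (fun s => pvVal s.toList)).sum
        = X + ((s :: rest).map (fun s => pvVal s.toList)).sum := by
      simp [List.map_cons]
      omega
    rw [harr]

lemma pvInt2_aux (cs : List Char) : ∀ (a : Nat),
    cs.foldl (fun x c => 2 * x + (if c = '1' then 1 else 0)) ((a : Nat) : Int)
      = ((cs.foldl (fun x c => 2 * x + (if c = '1' then 1 else 0)) a : Nat) : Int) := by
  induction cs with
  | nil => intro a; rfl
  | cons c cs ih =>
    intro a
    simp only [List.foldl_cons]
    rw [show (2 * ((a : Nat) : Int) + (if c = '1' then 1 else 0))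
        = (((2 * a + (if c = '1' then 1 else 0) : Nat)) : Int) by split_ifs <;> push_cast <;> ring]
    exact ih _

lemma pvInt2_eq_val (s : String) : pvInt2 s = ((pvVal s.toList : Nat) : Int) := by
  unfold pvInt2 pvVal
  exact_mod_cast pvInt2_aux s.toList 0

-- ===== VERDICT (by name: the statement is the Claim_ definition above) =====
theorem fixed_add_array_spec : Claim_equal_fixed_add_array := by
  intro adder_array integer _ hpre
  unfold Spec_fixed_add_array
  match adder_array, hpre with
  | [], _ => rfl
  | [s], _ => rfl
  | s0 :: s1 :: rest, hpre =>
    rcases hpre with hle | ⟨hL1, hallb⟩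
    · simp at hle
    have hall : ∀ s ∈ s0 :: s1 :: rest,
        s.toList.length = ((s0 :: s1 :: rest).headD "").toList.length ∧
        ∀ c ∈ s.toList, c = '0' ∨ c = '1' := by
      intro s hs
      simp only [List.all_eq_true, Bool.and_eq_true, beq_iff_eq, Bool.or_eq_true] at hallb
      exact hallb s hs
    have h0 : ¬ (PySem.List.len (s0 :: s1 :: rest) = 0) := by
      simp [PySem.List.len]
      omega
    have h1 : ¬ (PySem.List.len (s0 :: s1 :: rest) = 1) := by
      simp [PySem.List.len]
      omega
    obtain ⟨hs0l, hs0b⟩ := hall s0 (by simp)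
    obtain ⟨hs1l, hs1b⟩ := hall s1 (by simp)
    simp only [List.headD_cons] at hall hL1 hs0l hs1l
    unfold fixed_add_array fixed_add_array_alt
    rw [if_neg h0, if_neg h1, if_neg h0, if_neg h1]
    rw [PySem.List.foldl_pyRange_pyGetD (s0 :: s1 :: rest) ""
      (fun last s => String.ofList (unsigned_fixed_add s.toList last.toList).2)
      (PySem.List.pyGetD (s0 :: s1 :: rest) 0 "") (by norm_num : (0:Int) ≤ 1)]
    have hget0 : PySem.List.pyGetD (s0 :: s1 :: rest) 0 "" = s0 := by
      simp [pysem]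
    rw [hget0]
    have hdrop : List.drop (1 : Int).toNat (s0 :: s1 :: rest) = s1 :: rest := rfl
    rw [hdrop, List.foldl_cons]
    have hstep1 : String.ofList (unsigned_fixed_add s1.toList s0.toList).2
        = String.ofList ((pvBitsLSB s0.toList.length (pvVal s1.toList + pvVal s0.toList)).reverse) := by
      rw [pvUFA_result s0.toList.length s1.toList s0.toList hs1l rfl hs1b hs0b]
    rw [hstep1]
    rw [pvFold_tail s0.toList.length rest (fun t ht => hall t (by simp [ht]))
      (pvVal s1.toList + pvVal s0.toList)]
    -- B side
    dsimp only
    have htot : ((s0 :: s1 :: rest).map pvInt2).sum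
        = ((((s0 :: s1 :: rest).map (fun s => pvVal s.toList)).sum : Nat) : Int) := by
      rw [List.map_congr_left (fun s _ => pvInt2_eq_val s), Nat.cast_list_sum, List.map_map]
      rfl
    rw [htot]
    have hm : (((1 <<< s0.toList.length : Nat) : Int)) - 1 = ((2 ^ s0.toList.length - 1 : Nat) : Int) := by
      rw [Nat.one_shiftLeft]
      push_cast [Nat.one_le_two_pow]
      ring
    rw [hm, PySem.Int.band_natCast, Nat.and_two_pow_sub_one_eq_mod]
    have hfmt : pvFormatB
        ((((s0 :: s1 :: rest).map (fun s => pvVal s.toList)).sum % 2 ^ s0.toList.length : Nat) : Int)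
        s0.toList.length
        = String.ofList ((pvBitsLSB s0.toList.length
            (((s0 :: s1 :: rest).map (fun s => pvVal s.toList)).sum)).reverse) := by
      unfold pvFormatB
      rw [Int.toNat_natCast,
        ← pvBits_pad s0.toList.length _ (Nat.mod_lt _ (Nat.two_pow_pos _)), pvBitsLSB_mod]
    rw [hfmt]
    have harith : pvVal s1.toList + pvVal s0.toList
          + (rest.map (fun s => pvVal s.toList)).sum
        = ((s0 :: s1 :: rest).map (fun s => pvVal s.toList)).sum := by
      simp
      omega
    rw [harith]
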